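-- pv_equiv track=rewrite | github.com/Mallikarjun29/da6401_assignment2 | partA/train.py | get_filter_counts
-- ===== SOURCE A (Python) =====
-- def get_filter_counts(base_filters, n_layers, strategy):
--     if strategy == 'same':
--         return [base_filters] * n_layers
--     elif strategy == 'doubling':
--         return [base_filters * (2**i) for i in range(n_layers)]
--     elif strategy == 'halving':
--         return [base_filters // (2**i) for i in range(n_layers)]
--     else:
--         return [base_filters] * n_layers
-- ===== SOURCE B (Python) =====
-- def get_filter_counts(base_filters, n_layers, strategy):
--     result = []
--     current = base_filters
--     for _ in range(n_layers):
--         result.append(current)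
--         if strategy == 'doubling':
--             current *= 2
--         elif strategy == 'halving':
--             current //= 2
--     return result
-- ===== Notes on version B (the rewrite author's own statement) =====
-- stated objective: alternative
-- what changed: Replaces the per-element exponentiation 2**i inside three separate comprehensions with a single loop that threads a running accumulator (multiplied or floor-halved each iteration) and appends it.
import Mathlib
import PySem

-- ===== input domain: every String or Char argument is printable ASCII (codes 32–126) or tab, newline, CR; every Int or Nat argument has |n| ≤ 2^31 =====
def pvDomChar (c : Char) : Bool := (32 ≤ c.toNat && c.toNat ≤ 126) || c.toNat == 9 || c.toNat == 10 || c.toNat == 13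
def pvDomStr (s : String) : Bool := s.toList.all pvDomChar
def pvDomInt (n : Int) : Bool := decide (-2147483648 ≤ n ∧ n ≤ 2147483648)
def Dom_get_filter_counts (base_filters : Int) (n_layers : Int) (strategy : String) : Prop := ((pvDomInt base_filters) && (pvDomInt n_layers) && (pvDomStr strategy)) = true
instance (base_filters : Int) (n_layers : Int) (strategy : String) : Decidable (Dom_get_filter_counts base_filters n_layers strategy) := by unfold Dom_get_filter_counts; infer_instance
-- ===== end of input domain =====

-- B replaces A's three independent comprehensions (each recomputing 2**i) with one loop
-- threading a running accumulator; alternative decomposition, return value proved equal.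

-- ===== PORT A =====
def get_filter_counts (base_filters : Int) (n_layers : Int) (strategy : String) : List Int :=
  if strategy == "same" then
    PySem.List.pyRepeat [base_filters] n_layers
  else if strategy == "doubling" then
    (PySem.List.pyRange 0 n_layers 1).map (fun i => base_filters * (2 ^ i.toNat))
  else if strategy == "halving" then
    (PySem.List.pyRange 0 n_layers 1).map (fun i => PySem.Int.floordiv base_filters (2 ^ i.toNat))
  else
    PySem.List.pyRepeat [base_filters] n_layers

-- ===== PORT B =====
-- the loop of Source B: k iterations remaining, 'current' threaded across iterations
def gfcLoop (k : Nat) (current : Int) (strategy : String) : List Int :=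
  match k with
  | 0 => []
  | k + 1 =>
    current ::
      gfcLoop k
        (if strategy == "doubling" then current * 2
         else if strategy == "halving" then PySem.Int.floordiv current 2
         else current)
        strategy

def get_filter_counts_alt (base_filters : Int) (n_layers : Int) (strategy : String) : List Int :=
  gfcLoop n_layers.toNat base_filters strategy

-- ===== PRECONDITION & SPEC =====
def Spec_get_filter_counts (base_filters : Int) (n_layers : Int) (strategy : String) (out : List Int) : Prop := out = get_filter_counts_alt base_filters n_layers strategy
instance (base_filters : Int) (n_layers : Int) (strategy : String) (out : List Int) : Decidable (Spec_get_filter_counts base_filters n_layers strategy out) := by unfold Spec_get_filter_counts; infer_instance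

-- ===== CLAIM (what is proved, stated in full; the proofs are below) =====
def Claim_equal_get_filter_counts : Prop := ∀ (base_filters : Int) (n_layers : Int) (strategy : String), Dom_get_filter_counts base_filters n_layers strategy → Spec_get_filter_counts base_filters n_layers strategy (get_filter_counts base_filters n_layers strategy)

-- ===== LEMMAS AND PROOFS =====

theorem gfcLoop_other (k : Nat) (c : Int) (s : String)
    (h1 : (s == "doubling") = false) (h2 : (s == "halving") = false) :
    gfcLoop k c s = List.replicate k c := by
  induction k generalizing c with
  | zero => rfl
  | succ k ih => simp [gfcLoop, h1, h2, ih, List.replicate]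

theorem gfcLoop_doubling (k : Nat) (c : Int) :
    gfcLoop k c "doubling" = (List.range k).map (fun i => c * 2 ^ i) := by
  induction k generalizing c with
  | zero => rfl
  | succ k ih =>
    have hif : (if ("doubling" == "doubling") = true then c * 2
        else if ("doubling" == "halving") = true then PySem.Int.floordiv c 2 else c) = c * 2 := by
      simp
    simp only [gfcLoop, hif, ih, List.range_succ_eq_map, List.map_cons, List.map_map,
      pow_zero, mul_one, List.cons.injEq, true_and]
    apply List.map_congr_left
    intro i _
    simp only [Function.comp, pow_succ]
    ring

theorem floordiv_floordiv_two (a : Int) (i : Nat) :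
    PySem.Int.floordiv (PySem.Int.floordiv a 2) (2 ^ i) =
      PySem.Int.floordiv a (2 ^ (i + 1)) := by
  rw [PySem.Int.floordiv_eq_ediv_of_pos (a := a) (by norm_num : (0:Int) < 2),
      PySem.Int.floordiv_eq_ediv_of_pos (by positivity : (0:Int) < 2 ^ i),
      PySem.Int.floordiv_eq_ediv_of_pos (by positivity : (0:Int) < 2 ^ (i+1)),
      Int.ediv_ediv_of_nonneg (by norm_num : (0:Int) ≤ 2)]
  ring_nf

theorem gfcLoop_halving (k : Nat) (c : Int) :
    gfcLoop k c "halving" = (List.range k).map (fun i => PySem.Int.floordiv c (2 ^ i)) := by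
  induction k generalizing c with
  | zero => rfl
  | succ k ih =>
    have hif : (if ("halving" == "doubling") = true then c * 2
        else if ("halving" == "halving") = true then PySem.Int.floordiv c 2 else c) =
        PySem.Int.floordiv c 2 := by simp
    simp only [gfcLoop, hif, ih, List.range_succ_eq_map, List.map_cons, List.map_map,
      pow_zero, List.cons.injEq]
    refine ⟨by simp, ?_⟩
    apply List.map_congr_left
    intro i _
    simp only [Function.comp]
    exact floordiv_floordiv_two c i

theorem pyRange_map_toNat (n : Int) (f : Nat → Int) :
    (PySem.List.pyRange 0 n 1).map (fun i => f i.toNat) = (List.range n.toNat).map f := by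
  rw [PySem.List.pyRange_one]
  simp [List.map_map, Function.comp]

-- ===== VERDICT (by name: the statement is the Claim_ definition above) =====
theorem get_filter_counts_spec : Claim_equal_get_filter_counts := by
  intro b n s _
  unfold Spec_get_filter_counts get_filter_counts get_filter_counts_alt
  by_cases hs : s == "same"
  · have h1 : (s == "doubling") = false := by
      cases h : s == "doubling" <;> simp_all
    have h2 : (s == "halving") = false := by
      cases h : s == "halving" <;> simp_all
    simp [hs, gfcLoop_other _ _ _ h1 h2, PySem.List.pyRepeat_singleton]
  · by_cases hd : s == "doubling"
    · have : s = "doubling" := by simpa using hd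
      subst this
      simp only [hs, hd, if_false, if_true, Bool.false_eq_true]
      rw [gfcLoop_doubling, ← pyRange_map_toNat n (fun i => b * 2 ^ i)]
    · by_cases hh : s == "halving"
      · have : s = "halving" := by simpa using hh
        subst this
        simp only [hs, hd, hh, if_false, if_true, Bool.false_eq_true]
        rw [gfcLoop_halving, ← pyRange_map_toNat n (fun i => PySem.Int.floordiv b (2 ^ i))]
      · simp only [hs, hd, hh, if_false, Bool.false_eq_true]
        rw [gfcLoop_other _ _ _ (by simpa using hd) (by simpa using hh),
            PySem.List.pyRepeat_singleton]
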